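-- pv_equiv track=rewrite | github.com/Gawesomer/advent_of_code | 2020/day_19/code.py | compile_subrule
-- ===== SOURCE A (Python) =====
-- def combine_sets(s1, s2):
--     """
--     {'a', 'b'}, {'b', 'a'} -> {'ab', 'aa', 'bb', 'ba'}
--     """
--     combined = set()
--     for e1 in s1:
--         for e2 in s2:
--             combined.add(e1+e2)
--     return combined
--
-- def compile_subrule(rule, processed):
--     """
--     Takes subrule returns set of acceptable strings
--     """
--     compiled = []
--     for index in rule:
--         compiled.append(processed[index])
--     while len(compiled) > 1:
--         new_set = combine_sets(compiled.pop(0), compiled.pop(0))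
--         compiled.insert(0, new_set)
--     return compiled[0]
-- ===== SOURCE B (Python) =====
-- def compile_subrule(rule, processed):
--     """
--     Takes subrule returns set of acceptable strings.
--     Single left fold over the rule with a set comprehension: no intermediate
--     list of sets, no pop/insert queue, no helper.
--     """
--     acc = processed[rule[0]]
--     for index in rule[1:]:
--         nxt = processed[index]
--         acc = {a + b for a in acc for b in nxt}
--     return acc
-- ===== Notes on version B (the rewrite author's own statement) =====
-- stated objective: simpler
-- what changed: A first materialises the list of referenced sets and then reduces it with a while loop that pops the first two, combines them via a nested-loop helper and re-inserts at the front; B is a single left fold over the rule indices with a set comprehension, no intermediate list, queue mutation or helper.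
import Mathlib
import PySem

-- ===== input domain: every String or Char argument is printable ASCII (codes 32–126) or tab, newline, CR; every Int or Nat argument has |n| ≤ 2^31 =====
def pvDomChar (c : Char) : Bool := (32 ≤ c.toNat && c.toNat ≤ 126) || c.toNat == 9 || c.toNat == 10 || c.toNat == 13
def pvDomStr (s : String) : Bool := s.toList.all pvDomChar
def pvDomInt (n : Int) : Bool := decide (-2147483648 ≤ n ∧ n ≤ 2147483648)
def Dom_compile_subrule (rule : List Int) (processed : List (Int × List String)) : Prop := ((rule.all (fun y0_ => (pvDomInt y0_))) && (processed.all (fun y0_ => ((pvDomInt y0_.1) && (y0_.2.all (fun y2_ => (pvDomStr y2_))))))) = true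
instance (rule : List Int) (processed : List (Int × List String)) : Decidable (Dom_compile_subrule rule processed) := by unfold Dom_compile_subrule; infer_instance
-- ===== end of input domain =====

-- B replaces A's two-phase queue reduction (build list of sets, then while-loop pop/pop/combine/insert
-- with a nested-loop helper) by a single left fold over the rule with a set comprehension; objective: simpler.
-- Equivalence is about the RETURN value (the Pythons mutate nothing observable).

-- ===== PORT A =====
-- combine_sets: nested for-loops adding e1+e2 into a fresh set
def pyCombineSets (s1 s2 : List String) : List String :=
  s1.foldl (fun combined e1 =>
    s2.foldl (fun combined e2 => PySem.Set.add combined (e1 ++ e2)) combined)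
    (PySem.Set.empty)

-- the while-loop: while len(compiled) > 1: pop first two, combine, insert at front
def pyWhileCombine : List (List String) → List (List String)
  | x :: y :: rest => pyWhileCombine (pyCombineSets x y :: rest)
  | l => l
termination_by l => l.length
decreasing_by simp

def compile_subrule (rule : List Int) (processed : List (Int × List String)) : List String :=
  -- for index in rule: compiled.append(processed[index])  (dict lookup; KeyError excluded by Pre_)
  let compiled := rule.foldl (fun acc index => acc ++ [PySem.Dict.getD (PySem.Dict.mk processed) index []]) []
  -- return compiled[0]  (IndexError on empty rule excluded by Pre_)
  (pyWhileCombine compiled).headD []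

-- ===== PORT B =====
def compile_subrule_alt (rule : List Int) (processed : List (Int × List String)) : List String :=
  match rule with
  | [] => []  -- Source B raises IndexError here; excluded by Pre_
  | i :: rest =>
    rest.foldl (fun acc index =>
      let nxt := PySem.Dict.getD (PySem.Dict.mk processed) index []
      -- {a + b for a in acc for b in nxt}: a set built in iteration order = Set.ofList of the pair list (exact)
      PySem.Set.ofList (acc.flatMap (fun a => nxt.map (fun b => a ++ b))))
      (PySem.Dict.getD (PySem.Dict.mk processed) i [])

-- ===== PRECONDITION & SPEC =====
-- Pre_ excludes exactly the inputs where A raises: the empty rule (IndexError on compiled[0])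
-- and a rule index absent from the dict (KeyError on processed[index]).
def Pre_compile_subrule (rule : List Int) (processed : List (Int × List String)) : Prop :=
  rule ≠ [] ∧ ∀ i ∈ rule, (PySem.Dict.mk processed).contains i = true
instance (rule : List Int) (processed : List (Int × List String)) : Decidable (Pre_compile_subrule rule processed) := by unfold Pre_compile_subrule; infer_instance

def pvWitness_compile_subrule : List Int × (List (Int × List String)) := ([0, 1], [(0, ["a", "b"]), (1, ["c"])])

def Spec_compile_subrule (rule : List Int) (processed : List (Int × List String)) (out : List String) : Prop := out = compile_subrule_alt rule processed
instance (rule : List Int) (processed : List (Int × List String)) (out : List String) : Decidable (Spec_compile_subrule rule processed out) := by unfold Spec_compile_subrule; infer_instance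

-- ===== CLAIM (what is proved, stated in full; the proofs are below) =====
def Claim_equal_compile_subrule : Prop := ∀ (rule : List Int) (processed : List (Int × List String)), Dom_compile_subrule rule processed → Pre_compile_subrule rule processed → Spec_compile_subrule rule processed (compile_subrule rule processed)

-- ===== LEMMAS AND PROOFS =====

-- A's nested-loop combine is the deduplicated concatenation product.
theorem foldl_combine_eq (s1 s2 : List String) (init : List String) :
    s1.foldl (fun combined e1 =>
      s2.foldl (fun combined e2 => PySem.Set.add combined (e1 ++ e2)) combined) init
      = (s1.flatMap (fun a => s2.map (fun b => a ++ b))).foldl PySem.Set.add init := by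
  induction s1 generalizing init with
  | nil => rfl
  | cons a t ih =>
    simp only [List.foldl_cons, List.flatMap_cons, List.foldl_append, ih, List.foldl_map]

theorem pyCombineSets_eq (s1 s2 : List String) :
    pyCombineSets s1 s2 = PySem.Set.ofList (s1.flatMap (fun a => s2.map (fun b => a ++ b))) := by
  rw [pyCombineSets, PySem.Set.ofList_eq_foldl, foldl_combine_eq]
  rfl

-- A's while loop on a nonempty queue is a left fold of combine over the tail.
theorem pyWhileCombine_head (rest : List (List String)) (s : List String) :
    (pyWhileCombine (s :: rest)).headD [] = rest.foldl pyCombineSets s := by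
  induction rest generalizing s with
  | nil => simp [pyWhileCombine]
  | cons y t ih => rw [pyWhileCombine]; exact ih _

-- ===== VERDICT (by name: the statement is the Claim_ definition above) =====
theorem compile_subrule_spec : Claim_equal_compile_subrule := by
  intro rule processed _ hpre
  obtain ⟨hne, -⟩ := hpre
  unfold Spec_compile_subrule compile_subrule compile_subrule_alt
  match rule with
  | [] => exact absurd rfl hne
  | i :: rest =>
    simp only [PySem.List.foldl_append_singleton_eq_map, List.nil_append, List.map_cons,
      pyWhileCombine_head, List.foldl_map]
    have h : (fun (acc : List String) (index : Int) =>
        pyCombineSets acc (PySem.Dict.getD (PySem.Dict.mk processed) index []))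
        = fun acc index =>
          PySem.Set.ofList (acc.flatMap (fun a =>
            (PySem.Dict.getD (PySem.Dict.mk processed) index []).map (fun b => a ++ b))) := by
      funext acc index; rw [pyCombineSets_eq]
    rw [h]
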